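-- pv_equiv track=rewrite | github.com/MrBrantCode/unitest_baseline | mut_generate/mist_train_taco/taco_16115/solution.py | max_cake_cells_eaten
-- ===== SOURCE A (Python) =====
-- def max_cake_cells_eaten(r, c, cake):
--     rows_with_strawberry = set()
--     columns_with_strawberry = set()
--
--     # Identify rows and columns that contain strawberries
--     for i in range(r):
--         for j in range(c):
--             if cake[i][j] == 'S':
--                 rows_with_strawberry.add(i)
--                 columns_with_strawberry.add(j)
--
--     # Calculate the maximum number of cake cells that can be eaten
--     max_cells_eaten = 0
--     for i in range(r):
--         for j in range(c):
--             if cake[i][j] == 'S':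
--                 continue
--             if i not in rows_with_strawberry or j not in columns_with_strawberry:
--                 max_cells_eaten += 1
--
--     return max_cells_eaten
-- ===== SOURCE B (Python) =====
-- def max_cake_cells_eaten(r, c, cake):
--     rows_with_strawberry = set()
--     columns_with_strawberry = set()
--     for i in range(r):
--         for j in range(c):
--             if cake[i][j] == 'S':
--                 rows_with_strawberry.add(i)
--                 columns_with_strawberry.add(j)
--     nrows = max(r, 0)  # number of scanned rows, len(range(r))
--     ncols = max(c, 0)
--     free_rows = nrows - len(rows_with_strawberry)
--     free_cols = ncols - len(columns_with_strawberry)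
--     # inclusion-exclusion: every cell in a free row or free column is edible
--     return free_rows * ncols + free_cols * nrows - free_rows * free_cols
-- ===== Notes on version B (the rewrite author's own statement) =====
-- stated objective: faster
-- what changed: keeps the single marking pass but replaces A's second full grid scan with the closed-form inclusion-exclusion count free_rows*ncols + free_cols*nrows - free_rows*free_cols
import Mathlib
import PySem

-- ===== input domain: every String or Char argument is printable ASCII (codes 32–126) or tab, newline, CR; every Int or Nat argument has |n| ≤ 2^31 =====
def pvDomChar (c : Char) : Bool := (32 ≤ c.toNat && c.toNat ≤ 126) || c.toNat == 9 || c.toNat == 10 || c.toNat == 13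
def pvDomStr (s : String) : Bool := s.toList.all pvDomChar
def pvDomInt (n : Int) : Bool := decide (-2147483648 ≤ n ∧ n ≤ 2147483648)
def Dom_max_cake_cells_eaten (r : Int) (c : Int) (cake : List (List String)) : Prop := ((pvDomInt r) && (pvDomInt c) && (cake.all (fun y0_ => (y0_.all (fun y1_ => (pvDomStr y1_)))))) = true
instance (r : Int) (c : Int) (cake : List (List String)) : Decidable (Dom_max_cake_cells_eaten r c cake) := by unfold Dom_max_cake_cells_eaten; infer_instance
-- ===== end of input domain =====

-- B keeps A's single marking pass but replaces A's second full grid scan by the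
-- closed-form inclusion-exclusion count free_rows*ncols + free_cols*nrows - free_rows*free_cols.

-- ===== PORT A =====
-- cake[i][j] (both ports index only inside the grid on Pre_; the getD defaults are never hit there)
def pvCell (cake : List (List String)) (i j : Int) : String :=
  (PySem.List.pyGet? ((PySem.List.pyGet? cake i).getD []) j).getD ""

def max_cake_cells_eaten (r : Int) (c : Int) (cake : List (List String)) : Int :=
  let st := (PySem.List.pyRange 0 r 1).foldl (fun (st : PySem.Set Int × PySem.Set Int) i =>
      (PySem.List.pyRange 0 c 1).foldl (fun st j =>
        if pvCell cake i j = "S" then (PySem.Set.add st.1 i, PySem.Set.add st.2 j) else st) st)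
    (PySem.Set.empty, PySem.Set.empty)
  (PySem.List.pyRange 0 r 1).foldl (fun acc i =>
    (PySem.List.pyRange 0 c 1).foldl (fun acc j =>
      if pvCell cake i j = "S" then acc
      else if i ∉ st.1 ∨ j ∉ st.2 then acc + 1 else acc) acc) 0

-- ===== PORT B =====
def max_cake_cells_eaten_alt (r : Int) (c : Int) (cake : List (List String)) : Int :=
  let st := (PySem.List.pyRange 0 r 1).foldl (fun (st : PySem.Set Int × PySem.Set Int) i =>
      (PySem.List.pyRange 0 c 1).foldl (fun st j =>
        if pvCell cake i j = "S" then (PySem.Set.add st.1 i, PySem.Set.add st.2 j) else st) st)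
    (PySem.Set.empty, PySem.Set.empty)
  let nrows : Int := max r 0
  let ncols : Int := max c 0
  let freeRows : Int := nrows - (st.1.length : Int)
  let freeCols : Int := ncols - (st.2.length : Int)
  freeRows * ncols + freeCols * nrows - freeRows * freeCols

-- ===== PRECONDITION & SPEC =====
-- Pre_ excludes exactly the inputs where A raises IndexError: 0 < r and 0 < c but the grid
-- has fewer than r rows, or one of the first r rows has fewer than c cells.
def Pre_max_cake_cells_eaten (r : Int) (c : Int) (cake : List (List String)) : Prop :=
  (0 < r ∧ 0 < c) → (r ≤ (cake.length : Int) ∧ ∀ row ∈ cake.take r.toNat, c ≤ (row.length : Int))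
instance (r : Int) (c : Int) (cake : List (List String)) : Decidable (Pre_max_cake_cells_eaten r c cake) := by unfold Pre_max_cake_cells_eaten; infer_instance

def pvWitness_max_cake_cells_eaten : Int × Int × List (List String) :=
  (2, 2, [[".", "S"], [".", "."]])

def Spec_max_cake_cells_eaten (r : Int) (c : Int) (cake : List (List String)) (out : Int) : Prop := out = max_cake_cells_eaten_alt r c cake
instance (r : Int) (c : Int) (cake : List (List String)) (out : Int) : Decidable (Spec_max_cake_cells_eaten r c cake out) := by unfold Spec_max_cake_cells_eaten; infer_instance

-- ===== CLAIM (what is proved, stated in full; the proofs are below) =====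
def Claim_equal_max_cake_cells_eaten : Prop := ∀ (r : Int) (c : Int) (cake : List (List String)), Dom_max_cake_cells_eaten r c cake → Pre_max_cake_cells_eaten r c cake → Spec_max_cake_cells_eaten r c cake (max_cake_cells_eaten r c cake)

-- ===== LEMMAS AND PROOFS =====

-- row i contains a strawberry (within the scanned column range)
def pvRS (cake : List (List String)) (c : Int) (i : Int) : Bool :=
  (PySem.List.pyRange 0 c 1).any (fun j => decide (pvCell cake i j = "S"))
-- column j contains a strawberry (within the scanned row range)
def pvCS (cake : List (List String)) (r : Int) (j : Int) : Bool :=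
  (PySem.List.pyRange 0 r 1).any (fun i => decide (pvCell cake i j = "S"))

-- the shared pass-1 fold of both ports, as a named function for the lemmas
def pvPass1 (cake : List (List String)) (c : Int) (is : List Int) (st : PySem.Set Int × PySem.Set Int) : PySem.Set Int × PySem.Set Int :=
  is.foldl (fun st i =>
      (PySem.List.pyRange 0 c 1).foldl (fun st j =>
        if pvCell cake i j = "S" then (PySem.Set.add st.1 i, PySem.Set.add st.2 j) else st) st) st

lemma pvInner_fst (cake : List (List String)) (i : Int) (js : List Int) (R C : PySem.Set Int) :
    (js.foldl (fun st j => if pvCell cake i j = "S" then (PySem.Set.add st.1 i, PySem.Set.add st.2 j) else st) (R, C)).1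
      = (if js.any (fun j => decide (pvCell cake i j = "S")) then PySem.Set.add R i else R) := by
  induction js generalizing R C with
  | nil => simp
  | cons j t ih =>
    by_cases h : pvCell cake i j = "S"
    · simp only [List.foldl_cons, List.any_cons, h, if_pos, decide_true, Bool.true_or]
      rw [ih]
      have : i ∈ PySem.Set.add R i := by simp [PySem.Set.mem_add]
      split <;> simp
    · simp only [List.foldl_cons, List.any_cons, h, decide_false, Bool.false_or, ih]
      simp

lemma pvInner_snd_mem (cake : List (List String)) (i : Int) (js : List Int) (R C : PySem.Set Int) (y : Int) :
    (y ∈ (js.foldl (fun st j => if pvCell cake i j = "S" then (PySem.Set.add st.1 i, PySem.Set.add st.2 j) else st) (R, C)).2)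
      ↔ (y ∈ C ∨ (y ∈ js ∧ pvCell cake i y = "S")) := by
  induction js generalizing R C with
  | nil => simp
  | cons j t ih =>
    by_cases h : pvCell cake i j = "S"
    · simp only [List.foldl_cons, h, if_pos, ih, PySem.Set.mem_add, List.mem_cons]
      constructor
      · rintro ((hy | rfl) | hy)
        · exact Or.inl hy
        · exact Or.inr ⟨Or.inl rfl, h⟩
        · exact Or.inr ⟨Or.inr hy.1, hy.2⟩
      · rintro (hy | ⟨(rfl | hy), hS⟩)
        · exact Or.inl (Or.inl hy)
        · exact Or.inl (Or.inr rfl)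
        · exact Or.inr ⟨hy, hS⟩
    · simp only [List.foldl_cons, h, ih, List.mem_cons]
      constructor
      · rintro (hy | hy)
        · exact Or.inl hy
        · exact Or.inr ⟨Or.inr hy.1, hy.2⟩
      · rintro (hy | ⟨(rfl | hy), hS⟩)
        · exact Or.inl hy
        · exact absurd hS h
        · exact Or.inr ⟨hy, hS⟩

lemma pvInner_snd_nodup (cake : List (List String)) (i : Int) (js : List Int) (R C : PySem.Set Int) (h : C.Nodup) :
    (js.foldl (fun st j => if pvCell cake i j = "S" then (PySem.Set.add st.1 i, PySem.Set.add st.2 j) else st) (R, C)).2.Nodup := by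
  induction js generalizing R C with
  | nil => exact h
  | cons j t ih =>
    by_cases hS : pvCell cake i j = "S"
    · simp only [List.foldl_cons, hS, if_pos]
      exact ih _ _ (PySem.Set.nodup_add _ _ h)
    · simp only [List.foldl_cons, hS]
      exact ih _ _ h

-- the inner fold as a pair (first from pvInner_fst, second abstract)
lemma pvPass1_cons (cake : List (List String)) (c : Int) (i : Int) (is : List Int) (st : PySem.Set Int × PySem.Set Int) :
    pvPass1 cake c (i :: is) st
      = pvPass1 cake c is
          ((PySem.List.pyRange 0 c 1).foldl (fun st j =>
            if pvCell cake i j = "S" then (PySem.Set.add st.1 i, PySem.Set.add st.2 j) else st) st) := rfl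

lemma pvPass1_fst_mem (cake : List (List String)) (c : Int) (is : List Int) (R C : PySem.Set Int) (x : Int) :
    (x ∈ (pvPass1 cake c is (R, C)).1) ↔ (x ∈ R ∨ (x ∈ is ∧ pvRS cake c x = true)) := by
  induction is generalizing R C with
  | nil => simp [pvPass1]
  | cons i t ih =>
    rw [pvPass1_cons]
    have hpair : ((PySem.List.pyRange 0 c 1).foldl (fun st j =>
        if pvCell cake i j = "S" then (PySem.Set.add st.1 i, PySem.Set.add st.2 j) else st) (R, C))
        = (((PySem.List.pyRange 0 c 1).foldl (fun st j =>
        if pvCell cake i j = "S" then (PySem.Set.add st.1 i, PySem.Set.add st.2 j) else st) (R, C)).1,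
        ((PySem.List.pyRange 0 c 1).foldl (fun st j =>
        if pvCell cake i j = "S" then (PySem.Set.add st.1 i, PySem.Set.add st.2 j) else st) (R, C)).2) := rfl
    rw [hpair, ih, pvInner_fst]
    by_cases hi : pvRS cake c i = true
    · simp only [pvRS] at hi
      simp only [hi, if_pos, PySem.Set.mem_add, List.mem_cons]
      constructor
      · rintro ((hx | rfl) | hx)
        · exact Or.inl hx
        · exact Or.inr ⟨Or.inl rfl, by simpa [pvRS] using hi⟩
        · exact Or.inr ⟨Or.inr hx.1, hx.2⟩
      · rintro (hx | ⟨(rfl | hx), hS⟩)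
        · exact Or.inl (Or.inl hx)
        · exact Or.inl (Or.inr rfl)
        · exact Or.inr ⟨hx, hS⟩
    · rw [if_neg (by simpa [pvRS] using hi)]
      simp only [List.mem_cons]
      constructor
      · rintro (hx | hx)
        · exact Or.inl hx
        · exact Or.inr ⟨Or.inr hx.1, hx.2⟩
      · rintro (hx | ⟨(rfl | hx), hS⟩)
        · exact Or.inl hx
        · exact absurd hS hi
        · exact Or.inr ⟨hx, hS⟩

lemma pvPass1_fst_nodup (cake : List (List String)) (c : Int) (is : List Int) (R C : PySem.Set Int) (h : R.Nodup) :
    (pvPass1 cake c is (R, C)).1.Nodup := by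
  induction is generalizing R C with
  | nil => exact h
  | cons i t ih =>
    rw [pvPass1_cons]
    have hpair : ((PySem.List.pyRange 0 c 1).foldl (fun st j =>
        if pvCell cake i j = "S" then (PySem.Set.add st.1 i, PySem.Set.add st.2 j) else st) (R, C))
        = (((PySem.List.pyRange 0 c 1).foldl (fun st j =>
        if pvCell cake i j = "S" then (PySem.Set.add st.1 i, PySem.Set.add st.2 j) else st) (R, C)).1,
        ((PySem.List.pyRange 0 c 1).foldl (fun st j =>
        if pvCell cake i j = "S" then (PySem.Set.add st.1 i, PySem.Set.add st.2 j) else st) (R, C)).2) := rfl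
    rw [hpair]
    apply ih
    rw [pvInner_fst]
    split
    · exact PySem.Set.nodup_add _ _ h
    · exact h

lemma pvPass1_snd_mem (cake : List (List String)) (c : Int) (is : List Int) (R C : PySem.Set Int) (y : Int) :
    (y ∈ (pvPass1 cake c is (R, C)).2) ↔ (y ∈ C ∨ (∃ i ∈ is, y ∈ PySem.List.pyRange 0 c 1 ∧ pvCell cake i y = "S")) := by
  induction is generalizing R C with
  | nil => simp [pvPass1]
  | cons i t ih =>
    rw [pvPass1_cons]
    have hpair : ((PySem.List.pyRange 0 c 1).foldl (fun st j =>
        if pvCell cake i j = "S" then (PySem.Set.add st.1 i, PySem.Set.add st.2 j) else st) (R, C))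
        = (((PySem.List.pyRange 0 c 1).foldl (fun st j =>
        if pvCell cake i j = "S" then (PySem.Set.add st.1 i, PySem.Set.add st.2 j) else st) (R, C)).1,
        ((PySem.List.pyRange 0 c 1).foldl (fun st j =>
        if pvCell cake i j = "S" then (PySem.Set.add st.1 i, PySem.Set.add st.2 j) else st) (R, C)).2) := rfl
    rw [hpair, ih]
    rw [pvInner_snd_mem]
    constructor
    · rintro ((hy | hy) | ⟨i', hi', hy⟩)
      · exact Or.inl hy
      · exact Or.inr ⟨i, List.mem_cons_self, hy.1, hy.2⟩
      · exact Or.inr ⟨i', List.mem_cons_of_mem _ hi', hy⟩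
    · rintro (hy | ⟨i', hi', hy⟩)
      · exact Or.inl (Or.inl hy)
      · rcases List.mem_cons.mp hi' with rfl | hi'
        · exact Or.inl (Or.inr hy)
        · exact Or.inr ⟨i', hi', hy⟩

lemma pvPass1_snd_nodup (cake : List (List String)) (c : Int) (is : List Int) (R C : PySem.Set Int) (h : C.Nodup) :
    (pvPass1 cake c is (R, C)).2.Nodup := by
  induction is generalizing R C with
  | nil => exact h
  | cons i t ih =>
    rw [pvPass1_cons]
    have hpair : ((PySem.List.pyRange 0 c 1).foldl (fun st j =>
        if pvCell cake i j = "S" then (PySem.Set.add st.1 i, PySem.Set.add st.2 j) else st) (R, C))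
        = (((PySem.List.pyRange 0 c 1).foldl (fun st j =>
        if pvCell cake i j = "S" then (PySem.Set.add st.1 i, PySem.Set.add st.2 j) else st) (R, C)).1,
        ((PySem.List.pyRange 0 c 1).foldl (fun st j =>
        if pvCell cake i j = "S" then (PySem.Set.add st.1 i, PySem.Set.add st.2 j) else st) (R, C)).2) := rfl
    rw [hpair]
    exact ih _ _ (pvInner_snd_nodup cake i _ R C h)

lemma pvSum_map_ite (l : List Int) (p : Int → Bool) (a b : Int) :
    (l.map (fun x => if p x then a else b)).sum
      = (l.countP p : Int) * a + (l.countP (fun x => !p x) : Int) * b := by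
  induction l with
  | nil => simp
  | cons x t ih =>
    simp only [List.map_cons, List.sum_cons, ih, List.countP_cons]
    by_cases hx : p x
    · simp only [hx, Bool.not_true, if_pos]
      push_cast
      ring
    · simp only [Bool.not_eq_true] at hx
      simp only [hx, Bool.not_false]
      push_cast
      ring

lemma pvRange_toNat (r : Int) : PySem.List.pyRange 0 r 1 = PySem.List.pyRange 0 ((r.toNat : Nat) : Int) 1 := by
  by_cases h : 0 ≤ r
  · rw [Int.toNat_of_nonneg h]
  · have h1 : PySem.List.pyRange 0 r 1 = [] := by
      rw [List.eq_nil_iff_forall_not_mem]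
      intro x hx
      have := PySem.List.mem_pyRange_one.mp hx
      omega
    have h2 : r.toNat = 0 := by omega
    rw [h1, h2]
    rfl

theorem pvMain (r c : Int) (cake : List (List String)) :
    max_cake_cells_eaten r c cake = max_cake_cells_eaten_alt r c cake := by
  have hA : max_cake_cells_eaten r c cake
      = (PySem.List.pyRange 0 r 1).foldl (fun acc i =>
          (PySem.List.pyRange 0 c 1).foldl (fun acc j =>
            if pvCell cake i j = "S" then acc
            else if i ∉ (pvPass1 cake c (PySem.List.pyRange 0 r 1) (PySem.Set.empty, PySem.Set.empty)).1
                    ∨ j ∉ (pvPass1 cake c (PySem.List.pyRange 0 r 1) (PySem.Set.empty, PySem.Set.empty)).2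
              then acc + 1 else acc) acc) 0 := rfl
  have hB : max_cake_cells_eaten_alt r c cake
      = ((max r 0) - ((pvPass1 cake c (PySem.List.pyRange 0 r 1) (PySem.Set.empty, PySem.Set.empty)).1.length : Int)) * (max c 0)
        + ((max c 0) - ((pvPass1 cake c (PySem.List.pyRange 0 r 1) (PySem.Set.empty, PySem.Set.empty)).2.length : Int)) * (max r 0)
        - ((max r 0) - ((pvPass1 cake c (PySem.List.pyRange 0 r 1) (PySem.Set.empty, PySem.Set.empty)).1.length : Int))
          * ((max c 0) - ((pvPass1 cake c (PySem.List.pyRange 0 r 1) (PySem.Set.empty, PySem.Set.empty)).2.length : Int)) := rfl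
  set rows := PySem.List.pyRange 0 r 1 with hrows
  set cols := PySem.List.pyRange 0 c 1 with hcols
  set R := (pvPass1 cake c rows (PySem.Set.empty, PySem.Set.empty)).1 with hR
  set C := (pvPass1 cake c rows (PySem.Set.empty, PySem.Set.empty)).2 with hC
  -- facts about rows/cols
  have hrowsEq : rows = List.map (fun k : Nat => (k : Int)) (List.range r.toNat) := by
    rw [hrows, pvRange_toNat]; exact PySem.List.pyRange_zero_natCast _
  have hcolsEq : cols = List.map (fun k : Nat => (k : Int)) (List.range c.toNat) := by
    rw [hcols, pvRange_toNat]; exact PySem.List.pyRange_zero_natCast _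
  have hrowsNodup : rows.Nodup := by
    rw [hrowsEq]; exact (List.nodup_range).map Nat.cast_injective
  have hcolsNodup : cols.Nodup := by
    rw [hcolsEq]; exact (List.nodup_range).map Nat.cast_injective
  have hrlen : max r 0 = (rows.length : Int) := by
    rw [hrowsEq]; simp
  have hclen : max c 0 = (cols.length : Int) := by
    rw [hcolsEq]; simp
  -- membership in the two strawberry sets
  have hmemR : ∀ x : Int, x ∈ R ↔ (x ∈ rows ∧ pvRS cake c x = true) := by
    intro x
    rw [hR, pvPass1_fst_mem]
    simp [PySem.Set.empty]
  have hmemC : ∀ y : Int, y ∈ C ↔ (y ∈ cols ∧ pvCS cake r y = true) := by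
    intro y
    rw [hC, pvPass1_snd_mem]
    simp only [PySem.Set.empty, List.not_mem_nil, false_or]
    constructor
    · rintro ⟨i, hi, hy, hS⟩
      exact ⟨hy, List.any_eq_true.mpr ⟨i, hi, by simp [hS]⟩⟩
    · rintro ⟨hy, hCS⟩
      obtain ⟨i, hi, hS⟩ := List.any_eq_true.mp hCS
      exact ⟨i, hi, hy, by simpa using hS⟩
  -- lengths of the two sets
  have hRnodup : R.Nodup := pvPass1_fst_nodup cake c rows _ _ List.nodup_nil
  have hCnodup : C.Nodup := pvPass1_snd_nodup cake c rows _ _ List.nodup_nil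
  have hRlen : R.length = rows.countP (pvRS cake c) := by
    have hperm : R.Perm (rows.filter (pvRS cake c)) :=
      (List.perm_ext_iff_of_nodup hRnodup (hrowsNodup.filter _)).2 (fun a => by
        rw [hmemR a, List.mem_filter])
    rw [hperm.length_eq, ← List.countP_eq_length_filter]
  have hClen : C.length = cols.countP (pvCS cake r) := by
    have hperm : C.Perm (cols.filter (pvCS cake r)) :=
      (List.perm_ext_iff_of_nodup hCnodup (hcolsNodup.filter _)).2 (fun a => by
        rw [hmemC a, List.mem_filter])
    rw [hperm.length_eq, ← List.countP_eq_length_filter]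
  -- evaluate A's second pass row by row
  have hcnt : ∀ i ∈ rows,
      cols.countP (fun j => decide (¬ pvCell cake i j = "S" ∧ (i ∉ R ∨ j ∉ C)))
        = (if pvRS cake c i then cols.countP (fun j => !pvCS cake r j) else cols.length) := by
    intro i hi
    by_cases hRS : pvRS cake c i = true
    · rw [if_pos hRS]
      apply List.countP_congr
      intro j hj
      have hiR : i ∈ R := (hmemR i).2 ⟨hi, hRS⟩
      simp only [decide_eq_true_iff, Bool.not_eq_true']
      constructor
      · rintro ⟨hns, (hiR' | hjC)⟩
        · exact absurd hiR hiR'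
        · rcases Bool.eq_false_or_eq_true (pvCS cake r j) with h | h
          · exact absurd ((hmemC j).2 ⟨hj, h⟩) hjC
          · exact h
      · intro hCSf
        refine ⟨?_, Or.inr ?_⟩
        · intro hS
          have : pvCS cake r j = true := List.any_eq_true.mpr ⟨i, hi, by simp [hS]⟩
          simp [this] at hCSf
        · intro hjC
          have : pvCS cake r j = true := ((hmemC j).1 hjC).2
          simp [this] at hCSf
    · rw [if_neg hRS]
      rw [List.countP_eq_length.mpr]
      intro j hj
      have hns : ¬ pvCell cake i j = "S" := by
        intro hS
        exact hRS (List.any_eq_true.mpr ⟨j, hj, by simp [hS]⟩)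
      have hiR : i ∉ R := fun h => hRS ((hmemR i).1 h).2
      simp [hns, hiR]
  have hInner : ∀ (acc : Int), ∀ i ∈ rows,
      cols.foldl (fun acc j => if pvCell cake i j = "S" then acc
          else if i ∉ R ∨ j ∉ C then acc + 1 else acc) acc
        = acc + (if pvRS cake c i then ((cols.countP (fun j => !pvCS cake r j) : Nat) : Int)
                 else ((cols.length : Nat) : Int)) := by
    intro acc i hi
    rw [PySem.List.foldl_congr_mem cols _
        (fun acc j => if (¬ pvCell cake i j = "S" ∧ (i ∉ R ∨ j ∉ C)) then acc + 1 else acc) acc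
        (by intro acc' j hj
            by_cases h1 : pvCell cake i j = "S" <;> by_cases h2 : i ∉ R ∨ j ∉ C <;> simp [h1, h2])]
    rw [PySem.List.foldl_ite_add_one]
    rw [hcnt i hi]
    split <;> rfl
  have hA2 : max_cake_cells_eaten r c cake
      = (rows.map (fun i => if pvRS cake c i then ((cols.countP (fun j => !pvCS cake r j) : Nat) : Int)
                   else ((cols.length : Nat) : Int))).sum := by
    rw [hA]
    rw [PySem.List.foldl_congr_mem rows _
        (fun acc i => acc + (if pvRS cake c i then ((cols.countP (fun j => !pvCS cake r j) : Nat) : Int)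
                     else ((cols.length : Nat) : Int))) 0
        (by intro acc i hi; exact hInner acc i hi)]
    rw [PySem.List.foldl_add, zero_add]
  rw [hA2, hB, pvSum_map_ite, hRlen, hClen]
  -- pure arithmetic finish
  have h1' : max r 0 = ((rows.countP (pvRS cake c) : Nat) : Int) + ((rows.countP (fun x => !pvRS cake c x) : Nat) : Int) := by
    have h := List.length_eq_countP_add_countP (pvRS cake c) (l := rows)
    have h2 : rows.countP (fun a => decide (¬ pvRS cake c a = true)) = rows.countP (fun x => !pvRS cake c x) := by
      apply List.countP_congr; intro x _; simp
    rw [h2] at h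
    rw [hrlen]
    exact_mod_cast congrArg (Nat.cast : Nat → Int) h
  have h2' : ((cols.length : Nat) : Int) = ((cols.countP (pvCS cake r) : Nat) : Int) + ((cols.countP (fun j => !pvCS cake r j) : Nat) : Int) := by
    have h := List.length_eq_countP_add_countP (pvCS cake r) (l := cols)
    have h2 : cols.countP (fun a => decide (¬ pvCS cake r a = true)) = cols.countP (fun j => !pvCS cake r j) := by
      apply List.countP_congr; intro x _; simp
    rw [h2] at h
    exact_mod_cast congrArg (Nat.cast : Nat → Int) h
  set a1 := ((rows.countP (pvRS cake c) : Nat) : Int) with ha1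
  set a2 := ((rows.countP (fun x => !pvRS cake c x) : Nat) : Int) with ha2
  set b1 := ((cols.countP (pvCS cake r) : Nat) : Int) with hb1
  set b2 := ((cols.countP (fun j => !pvCS cake r j) : Nat) : Int) with hb2
  have h4 : max c 0 = b1 + b2 := by rw [hclen]; exact h2'
  rw [h2', h1', h4]
  ring

-- ===== VERDICT (by name: the statement is the Claim_ definition above) =====
theorem max_cake_cells_eaten_spec : Claim_equal_max_cake_cells_eaten := by
  intro r c cake _ _
  unfold Spec_max_cake_cells_eaten
  exact pvMain r c cake
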